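-- pv_equiv track=rewrite | github.com/Alejo-UTN/Parser_test | Lexer_tp.py | afdtoken19
-- ===== SOURCE A (Python) =====
-- estadofinal = "estado_final"
--
-- estadonofinal = "estado2 no aceptado"
--
-- estadotrampa = "esta en estado2 trampa"
--
-- def afdtoken19(lexema):    # este usa la misma estrutuctura que el adf anterior primero se verifica que el primer caracter sea letra p _ y despues verifica que si los demas caracteres estan en las palabras permitidas para que sea un ide
--     estado19 = 0
--     estadofinal19 = [1]
--     caracteresValidos = "_abcdefghijklmnopqrstuvwxyzABCDEFGHIJKLMNOPQRSTUVWXYZ0123456789"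
--
--     for caracter in lexema:
--         if estado19 == 0:
--             if caracter.isalpha() or caracter == "_":
--                 estado19 = 1
--             else:
--                 estado19 = -1  # Estado de error
--                 break
--         elif estado19 == 1:
--             if caracter not in caracteresValidos:
--                 estado19 = -1  # Estado de error
--                 break
--     if estado19 == -1 :
--         return estadotrampa
--     if estado19 in estadofinal19:
--         return estadofinal
--     else:
--         return estadonofinal
-- ===== SOURCE B (Python) =====
-- estadofinal = "estado_final"
--
-- estadonofinal = "estado2 no aceptado"
--
-- estadotrampa = "esta en estado2 trampa"
--
-- caracteresValidos = "_abcdefghijklmnopqrstuvwxyzABCDEFGHIJKLMNOPQRSTUVWXYZ0123456789"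
--
-- def afdtoken19(lexema):
--     # phased early returns instead of a state-variable DFA loop
--     if not lexema:
--         return estadonofinal
--     if not (lexema[0].isalpha() or lexema[0] == "_"):
--         return estadotrampa
--     if all(c in caracteresValidos for c in lexema[1:]):
--         return estadofinal
--     return estadotrampa
-- ===== Notes on version B (the rewrite author's own statement) =====
-- stated objective: simpler
-- what changed: Replaced the explicit DFA state-variable loop with break/error-state bookkeeping by three phased early returns: empty check, first-character check, then all() over the tail.
import Mathlib
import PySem

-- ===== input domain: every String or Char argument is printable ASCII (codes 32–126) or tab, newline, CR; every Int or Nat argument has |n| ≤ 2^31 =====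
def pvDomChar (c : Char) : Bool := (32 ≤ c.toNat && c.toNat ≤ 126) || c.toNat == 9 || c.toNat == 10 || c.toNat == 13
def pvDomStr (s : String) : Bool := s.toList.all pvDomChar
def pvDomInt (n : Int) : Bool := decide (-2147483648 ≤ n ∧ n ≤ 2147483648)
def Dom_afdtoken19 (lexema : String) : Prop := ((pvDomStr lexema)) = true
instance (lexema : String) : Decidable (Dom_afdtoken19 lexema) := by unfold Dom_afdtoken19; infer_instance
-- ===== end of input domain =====

-- B: phased early-returns (empty / first char / tail scan) instead of A's state-variable DFA loop; simpler.


-- ===== PORT A =====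
def pvValidos : List Char := "_abcdefghijklmnopqrstuvwxyzABCDEFGHIJKLMNOPQRSTUVWXYZ0123456789".toList

-- loop of A: state estado19 threaded through the characters, break = returning -1 at once
def afdtoken19Loop : List Char → Int → Int
  | [], s => s
  | c :: cs, s =>
    if s == 0 then
      (if PySem.Chars.isalpha c || c == '_' then afdtoken19Loop cs 1 else (-1))
    else if s == 1 then
      (if !(pvValidos.contains c) then (-1) else afdtoken19Loop cs 1)
    else afdtoken19Loop cs s

def afdtoken19 (lexema : String) : String :=
  let estado19 := afdtoken19Loop lexema.toList 0
  if estado19 == -1 then "esta en estado2 trampa"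
  else if [(1 : Int)].contains estado19 then "estado_final"
  else "estado2 no aceptado"

-- ===== PORT B =====
def afdtoken19_alt (lexema : String) : String :=
  match lexema.toList with
  | [] => "estado2 no aceptado"
  | c :: rest =>
    if !(PySem.Chars.isalpha c || c == '_') then "esta en estado2 trampa"
    else if rest.all (fun d => pvValidos.contains d) then "estado_final"
    else "esta en estado2 trampa"

-- ===== PRECONDITION & SPEC =====
def Spec_afdtoken19 (lexema : String) (out : String) : Prop := out = afdtoken19_alt lexema
instance (lexema : String) (out : String) : Decidable (Spec_afdtoken19 lexema out) := by unfold Spec_afdtoken19; infer_instance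

-- ===== CLAIM (what is proved, stated in full; the proofs are below) =====
def Claim_equal_afdtoken19 : Prop := ∀ (lexema : String), Dom_afdtoken19 lexema → Spec_afdtoken19 lexema (afdtoken19 lexema)

-- ===== LEMMAS AND PROOFS =====

-- ===== VERDICT (by name: the statement is the Claim_ definition above) =====
lemma loop_one (cs : List Char) :
    afdtoken19Loop cs 1 = if cs.all (fun d => pvValidos.contains d) then 1 else -1 := by
  induction cs with
  | nil => simp [afdtoken19Loop]
  | cons c cs ih =>
    simp only [afdtoken19Loop, List.all_cons]
    by_cases h : c ∈ pvValidos <;> simp [h, ih]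

theorem afdtoken19_spec : Claim_equal_afdtoken19 := by
  intro lexema _
  unfold Spec_afdtoken19 afdtoken19 afdtoken19_alt
  cases hl : lexema.toList with
  | nil => simp [afdtoken19Loop]
  | cons c rest =>
    simp only [afdtoken19Loop]
    by_cases h : (PySem.Chars.isalpha c || c == '_') = true
    · simp only [h, if_true, loop_one]
      by_cases ha : ∀ x ∈ rest, x ∈ pvValidos
      · have hne : ¬ ∃ x ∈ rest, x ∉ pvValidos := by push_neg; exact ha
        simp [hne, ha]
      · have hex : ∃ x ∈ rest, x ∉ pvValidos := by push_neg at ha; exact ha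
        simp [hex, ha]
    · simp [h]
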